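-- pv_equiv track=rewrite | github.com/DeScAI-Team/Claim-extractor | claim-classifier/classify_claims.py | parse_tags_from_prompt_md
-- ===== SOURCE A (Python) =====
-- def parse_tags_from_prompt_md(text: str) -> frozenset[str]:
--     """Build allowlist from the Tags: section (lines until first blank line)."""
--     lines = text.splitlines()
--     try:
--         idx = next(i for i, line in enumerate(lines) if line.strip() == "Tags:")
--     except StopIteration:
--         raise ValueError("Tags: section not found in classifier prompt markdown") from None
--
--     tags: list[str] = []
--     for line in lines[idx + 1 :]:
--         if not line.strip():
--             break
--         tags.append(line.strip())
--     return frozenset(tags)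
-- ===== SOURCE B (Python) =====
-- def parse_tags_from_prompt_md(text: str) -> frozenset[str]:
--     """Build allowlist from the Tags: section (lines until first blank line)."""
--     # Stage 1: group the stripped lines into blank-separated paragraphs.
--     paragraphs: list[list[str]] = []
--     current: list[str] = []
--     for line in text.splitlines():
--         s = line.strip()
--         if s:
--             current.append(s)
--         elif current:
--             paragraphs.append(current)
--             current = []
--     if current:
--         paragraphs.append(current)
--     # Stage 2: the tags are what follows "Tags:" inside its paragraph.
--     for para in paragraphs:
--         if "Tags:" in para:
--             return frozenset(para[para.index("Tags:") + 1:])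
--     raise ValueError("Tags: section not found in classifier prompt markdown")
-- ===== Notes on version B (the rewrite author's own statement) =====
-- stated objective: alternative
-- what changed: Instead of locating the Tags: line and scanning forward until a blank line, B first segments the document into blank-separated paragraphs of stripped lines and then returns the suffix after 'Tags:' inside the first paragraph containing it.
import Mathlib
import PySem

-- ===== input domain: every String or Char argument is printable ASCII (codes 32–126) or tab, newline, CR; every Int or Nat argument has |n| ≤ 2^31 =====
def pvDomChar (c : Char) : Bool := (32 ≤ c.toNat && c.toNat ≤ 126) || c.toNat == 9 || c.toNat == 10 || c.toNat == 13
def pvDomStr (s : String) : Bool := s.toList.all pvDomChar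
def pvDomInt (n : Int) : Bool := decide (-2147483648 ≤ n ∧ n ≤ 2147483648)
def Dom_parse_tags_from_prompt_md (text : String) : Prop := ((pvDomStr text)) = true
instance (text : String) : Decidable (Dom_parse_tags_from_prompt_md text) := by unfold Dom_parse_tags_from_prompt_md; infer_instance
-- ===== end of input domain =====

-- B segments the input into blank-separated paragraphs of stripped lines and takes the suffix after "Tags:" in its paragraph, instead of A's find-the-line-then-scan-until-blank (objective: alternative).
-- A raises ValueError when no line strips to "Tags:"; Pre_ excludes exactly those inputs (B raises there too).


-- ===== PORT A =====
-- next(i for i, line in enumerate(lines) if line.strip() == "Tags:"): first matching index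
def pvFindTagsIdx : List String → Option Nat
  | [] => none
  | l :: ls =>
    if PySem.Str.strip l = "Tags:" then some 0
    else (pvFindTagsIdx ls).map (· + 1)

-- the for-loop with break over lines[idx+1:]
def pvCollectA : List String → List String
  | [] => []
  | l :: ls =>
    if PySem.Str.strip l = "" then []
    else PySem.Str.strip l :: pvCollectA ls

def parse_tags_from_prompt_md (text : String) : List String :=
  let lines := PySem.Str.splitlines text
  match pvFindTagsIdx lines with
  | none => []  -- Python raises ValueError here; excluded by Pre_
  | some idx => PySem.Set.ofList (pvCollectA (lines.drop (idx + 1)))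

-- ===== PORT B =====
-- stage 1: the for-loop grouping stripped lines into blank-separated paragraphs (state: current)
def pvParasGo : List String → List String → List (List String)
  | [], cur => if cur = [] then [] else [cur]        -- trailing 'if current: paragraphs.append(current)'
  | l :: ls, cur =>
    let s := PySem.Str.strip l
    if s ≠ "" then pvParasGo ls (cur ++ [s])
    else if cur = [] then pvParasGo ls []
    else cur :: pvParasGo ls []

-- stage 2: 'for para in paragraphs: if "Tags:" in para: return frozenset(para[para.index("Tags:") + 1:])'
def pvFindPara : List (List String) → Option (List String)
  | [] => none
  | p :: ps =>
    if "Tags:" ∈ p then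
      some (p.drop (((PySem.List.index? p "Tags:").getD 0) + 1))  -- para[para.index(..)+1:], index is in range since "Tags:" ∈ p
    else pvFindPara ps

def parse_tags_from_prompt_md_alt (text : String) : List String :=
  match pvFindPara (pvParasGo (PySem.Str.splitlines text) []) with
  | some tags => PySem.Set.ofList tags
  | none => []  -- Python raises ValueError here; excluded by Pre_

-- ===== PRECONDITION & SPEC =====
-- A raises ValueError iff no line of the input strips to "Tags:"; Pre_ excludes exactly those inputs.
def Pre_parse_tags_from_prompt_md (text : String) : Prop :=
  ∃ l ∈ PySem.Str.splitlines text, PySem.Str.strip l = "Tags:"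
instance (text : String) : Decidable (Pre_parse_tags_from_prompt_md text) := by
  unfold Pre_parse_tags_from_prompt_md; infer_instance

def pvWitness_parse_tags_from_prompt_md : String := "Tags:\nclaim\nfact\n\nrest"

def Spec_parse_tags_from_prompt_md (text : String) (out : List String) : Prop := out = parse_tags_from_prompt_md_alt text
instance (text : String) (out : List String) : Decidable (Spec_parse_tags_from_prompt_md text out) := by unfold Spec_parse_tags_from_prompt_md; infer_instance

-- ===== CLAIM (what is proved, stated in full; the proofs are below) =====
def Claim_equal_parse_tags_from_prompt_md : Prop := ∀ (text : String), Dom_parse_tags_from_prompt_md text → Pre_parse_tags_from_prompt_md text → Spec_parse_tags_from_prompt_md text (parse_tags_from_prompt_md text)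

-- ===== LEMMAS AND PROOFS =====

-- once "Tags:" is in the open paragraph, the search returns that paragraph's suffix after the first "Tags:"
theorem pvFindPara_collecting (ls cur : List String) (h : "Tags:" ∈ cur) :
    pvFindPara (pvParasGo ls cur) =
      some ((cur ++ pvCollectA ls).drop (((PySem.List.index? cur "Tags:").getD 0) + 1)) := by
  induction ls generalizing cur with
  | nil =>
    have hne : cur ≠ [] := by rintro rfl; simp at h
    simp [pvParasGo, hne, pvFindPara, h, pvCollectA]
  | cons l ls ih =>
    simp only [pvParasGo, pvCollectA]
    by_cases hs : PySem.Str.strip l = ""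
    · have hne : cur ≠ [] := by rintro rfl; simp at h
      simp [hs, hne, pvFindPara, h]
    · have h' : "Tags:" ∈ cur ++ [PySem.Str.strip l] := by simp [h]
      rw [if_pos (by simpa using hs), ih _ h']
      rw [PySem.List.index?_append_of_mem _ h]
      simp [hs]

-- while "Tags:" has not been seen, B's paragraph search computes A's find-then-collect
theorem pvFindPara_search (ls cur : List String) (h : "Tags:" ∉ cur) :
    pvFindPara (pvParasGo ls cur) =
      match pvFindTagsIdx ls with
      | none => none
      | some idx => some (pvCollectA (ls.drop (idx + 1))) := by
  induction ls generalizing cur with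
  | nil =>
    by_cases hne : cur = []
    · simp [pvParasGo, hne, pvFindPara, pvFindTagsIdx]
    · simp [pvParasGo, hne, pvFindPara, h, pvFindTagsIdx]
  | cons l ls ih =>
    simp only [pvParasGo, pvFindTagsIdx]
    by_cases hs : PySem.Str.strip l = ""
    · have hl : PySem.Str.strip l ≠ "Tags:" := by simp [hs]
      rw [if_neg (by simpa using hs)]
      have htail : pvFindPara (pvParasGo ls []) =
          match pvFindTagsIdx ls with
          | none => none
          | some idx => some (pvCollectA (ls.drop (idx + 1))) := ih [] (by simp)
      by_cases hne : cur = []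
      · rw [if_pos hne, htail]
        cases hf : pvFindTagsIdx ls with
        | none => simp [hl]
        | some idx => simp [hl, List.drop_succ_cons]
      · rw [if_neg hne]
        have : pvFindPara (cur :: pvParasGo ls []) = pvFindPara (pvParasGo ls []) := by
          simp [pvFindPara, h]
        rw [this, htail]
        cases hf : pvFindTagsIdx ls with
        | none => simp [hl]
        | some idx => simp [hl, List.drop_succ_cons]
    · by_cases hl : PySem.Str.strip l = "Tags:"
      · rw [if_pos (by simpa using hs)]
        have h' : "Tags:" ∈ cur ++ [PySem.Str.strip l] := by simp [hl]
        rw [pvFindPara_collecting _ _ h']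
        rw [hl, PySem.List.index?_append_singleton_self _ _ h]
        simp
      · rw [if_pos (by simpa using hs)]
        have h' : "Tags:" ∉ cur ++ [PySem.Str.strip l] := by
          simp [h]; exact fun c => hl c.symm
        rw [ih _ h']
        cases hf : pvFindTagsIdx ls with
        | none => simp [hl]
        | some idx => simp [hl, List.drop_succ_cons]

-- if Pre_ holds, A's search succeeds
theorem pvFindTagsIdx_isSome {ls : List String}
    (h : ∃ l ∈ ls, PySem.Str.strip l = "Tags:") : (pvFindTagsIdx ls).isSome := by
  induction ls with
  | nil => simp at h
  | cons l ls ih =>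
    simp only [pvFindTagsIdx]
    by_cases hl : PySem.Str.strip l = "Tags:"
    · simp [hl]
    · rcases h with ⟨x, hx, hs⟩
      rcases List.mem_cons.mp hx with rfl | hx
      · exact absurd hs hl
      · simpa [hl] using ih ⟨x, hx, hs⟩

-- ===== VERDICT (by name: the statement is the Claim_ definition above) =====
theorem parse_tags_from_prompt_md_spec : Claim_equal_parse_tags_from_prompt_md := by
  intro text _ hpre
  unfold Spec_parse_tags_from_prompt_md parse_tags_from_prompt_md parse_tags_from_prompt_md_alt
  rw [pvFindPara_search _ [] (by simp)]
  have := pvFindTagsIdx_isSome (ls := PySem.Str.splitlines text) hpre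
  cases hf : pvFindTagsIdx (PySem.Str.splitlines text) with
  | none => rw [hf] at this; simp at this
  | some idx => simp [hf]
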